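-- pv_equiv track=rewrite | github.com/stbrumme/leetcode | 2178.py | maximumEvenSplit
-- ===== SOURCE A (Python) =====
-- from typing import List
--
-- def maximumEvenSplit(finalSum: int) -> List[int]:
--     if finalSum & 1 or finalSum == 0:
--         return []
--
--     # 2,4,6,8,10,...
--     result = [ 2 ]
--     last   = total = 2
--     while total < finalSum:
--         last  += 2
--         total += last
--         result.append(last)
--
--     # adjust last two numbers if too large
--     if total > finalSum:
--         total -= result.pop()
--         total -= result.pop()
--         result.append(finalSum - total)
--
--     return result
-- ===== SOURCE B (Python) =====
-- from typing import List
--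
-- def _isqrt(n: int) -> int:
--     # integer square root of n >= 1 by Newton's method
--     x = n
--     y = (x + 1) // 2
--     while y < x:
--         x = y
--         y = (x + n // x) // 2
--     return x
--
-- def maximumEvenSplit(finalSum: int) -> List[int]:
--     if finalSum & 1 or finalSum == 0:
--         return []
--     # k = largest k with 2+4+...+2k = k*(k+1) <= finalSum, found in closed form:
--     # k*(k+1) <= S  <=>  (2k+1)^2 <= 4S+1
--     k = (_isqrt(4 * finalSum + 1) - 1) // 2
--     return [2 * j for j in range(1, k)] + [finalSum - k * (k - 1)]
-- ===== Notes on version B (the rewrite author's own statement) =====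
-- stated objective: alternative
-- what changed: B computes the number k of summands in closed form from an integer square root (largest k with k*(k+1) <= finalSum, via k = (isqrt(4*finalSum+1)-1)//2, isqrt by Newton's integer iteration) and then emits [2,4,...,2(k-1), finalSum-k*(k-1)] directly, instead of A's greedy accumulate-until-overshoot loop with a pop-two-and-reinsert repair.
import Mathlib
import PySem

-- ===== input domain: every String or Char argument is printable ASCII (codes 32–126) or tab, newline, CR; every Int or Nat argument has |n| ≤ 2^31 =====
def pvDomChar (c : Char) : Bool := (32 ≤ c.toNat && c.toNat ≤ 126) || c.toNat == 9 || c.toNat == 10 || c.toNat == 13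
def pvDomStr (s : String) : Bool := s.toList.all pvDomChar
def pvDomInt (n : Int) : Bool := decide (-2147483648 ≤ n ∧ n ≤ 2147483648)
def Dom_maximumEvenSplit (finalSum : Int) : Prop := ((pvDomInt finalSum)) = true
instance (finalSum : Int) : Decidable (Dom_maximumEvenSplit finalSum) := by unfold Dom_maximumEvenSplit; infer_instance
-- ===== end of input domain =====

-- B computes the number k of summands in closed form from a Newton integer square root
-- and writes the answer list down directly, replacing A's greedy accumulate-until-
-- overshoot loop with its pop-two-and-reinsert repair (alternative algorithm).

-- ===== PORT A =====
-- the while loop of A; the hypothesis 0 ≤ last only serves termination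
def loopA (finalSum last total : Int) (result : List Int) (hlast : 0 ≤ last) :
    List Int × Int :=
  if h : total < finalSum then
    loopA finalSum (last + 2) (total + (last + 2)) (result ++ [last + 2]) (by omega)
  else (result, total)
termination_by (finalSum - total).toNat
decreasing_by omega

-- the 'adjust last two numbers' block of A (pop = take last element / drop it)
def finishA (finalSum : Int) (result : List Int) (total : Int) : List Int :=
  if total > finalSum then
    (result.dropLast.dropLast) ++
      [finalSum - (total - result.getLast! - result.dropLast.getLast!)]
  else result

def maximumEvenSplit (finalSum : Int) : List Int :=
  if PySem.Int.band finalSum 1 ≠ 0 ∨ finalSum = 0 then []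
  else
    let p := loopA finalSum 2 2 [2] (by norm_num)
    finishA finalSum p.1 p.2

-- ===== PORT B =====
-- the 'while y < x: x = y; y = (x + n // x) // 2' loop of B's _isqrt; the hypothesis
-- hk only serves termination (whenever the body runs, y — the next x — and n are ≥ 1)
def isqrtAux (n x y : Int) (hk : y < x → 1 ≤ y ∧ 1 ≤ n) : Int :=
  if h : y < x then
    isqrtAux n y (PySem.Int.floordiv (y + PySem.Int.floordiv n y) 2)
      (fun _ => ⟨by
        obtain ⟨hy, hn⟩ := hk h
        have h0 : 0 ≤ PySem.Int.floordiv n y := by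
          rw [PySem.Int.le_floordiv_iff_mul_le (by omega)]; omega
        have h1 : 2 ≤ y + PySem.Int.floordiv n y := by
          by_cases h2 : y < 2
          · have : 1 ≤ PySem.Int.floordiv n y := by
              rw [PySem.Int.le_floordiv_iff_mul_le (by omega)]; omega
            omega
          · omega
        rw [PySem.Int.le_floordiv_iff_mul_le (by norm_num)]; omega,
        (hk h).2⟩)
  else x
termination_by x.toNat
decreasing_by
  obtain ⟨hy, _⟩ := hk h; omega

-- _isqrt(n): x = n; y = (x + 1) // 2; loop; return x
def isqrtB (n : Int) : Int :=
  isqrtAux n n (PySem.Int.floordiv (n + 1) 2)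
    (fun h => by
      rw [PySem.Int.floordiv_lt_iff_lt_mul (by norm_num)] at h
      constructor
      · rw [PySem.Int.le_floordiv_iff_mul_le (by norm_num)]; omega
      · omega)

def maximumEvenSplit_alt (finalSum : Int) : List Int :=
  if PySem.Int.band finalSum 1 ≠ 0 ∨ finalSum = 0 then []
  else
    let k := PySem.Int.floordiv (isqrtB (4 * finalSum + 1) - 1) 2
    (PySem.List.pyRange 1 k 1).map (fun j => 2 * j) ++ [finalSum - k * (k - 1)]

-- ===== PRECONDITION & SPEC =====
-- Pre_ excludes negative even inputs, on which A raises IndexError (the second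
-- result.pop() runs on an empty list).
def Pre_maximumEvenSplit (finalSum : Int) : Prop := finalSum % 2 ≠ 0 ∨ 0 ≤ finalSum
instance (finalSum : Int) : Decidable (Pre_maximumEvenSplit finalSum) := by
  unfold Pre_maximumEvenSplit; infer_instance
def pvWitness_maximumEvenSplit : Int := (12)

def Spec_maximumEvenSplit (finalSum : Int) (out : List Int) : Prop := out = maximumEvenSplit_alt finalSum
instance (finalSum : Int) (out : List Int) : Decidable (Spec_maximumEvenSplit finalSum out) := by unfold Spec_maximumEvenSplit; infer_instance

-- ===== CLAIM (what is proved, stated in full; the proofs are below) =====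
def Claim_equal_maximumEvenSplit : Prop := ∀ (finalSum : Int), Dom_maximumEvenSplit finalSum → Pre_maximumEvenSplit finalSum → Spec_maximumEvenSplit finalSum (maximumEvenSplit finalSum)

-- ===== LEMMAS AND PROOFS =====

-- [2, 4, ..., 2m]
def evens (m : Int) : List Int := (PySem.List.pyRange 1 (m + 1) 1).map (fun j => 2 * j)

theorem evens_succ (m : Int) (hm : 0 ≤ m) : evens (m + 1) = evens m ++ [2 * (m + 1)] := by
  unfold evens
  rw [PySem.List.pyRange_one_succ_right (by omega)]
  simp

theorem getLast!_app (xs : List Int) (x : Int) : (xs ++ [x]).getLast! = x := by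
  rcases xs with _ | ⟨a, as⟩ <;> simp [List.getLast!]

-- Newton lower bound: for 1 ≤ x and s*s ≤ n (0 ≤ s), s ≤ (x + n//x)//2
theorem newton_lower (n x s : Int) (hx : 1 ≤ x) (hsn : s * s ≤ n) :
    s ≤ PySem.Int.floordiv (x + PySem.Int.floordiv n x) 2 := by
  rw [PySem.Int.le_floordiv_iff_mul_le (by norm_num)]
  have hq : 2 * s - x ≤ PySem.Int.floordiv n x := by
    by_cases h : 2 * s - x ≤ 0
    · have : 0 ≤ PySem.Int.floordiv n x := by
        rw [PySem.Int.le_floordiv_iff_mul_le hx]; nlinarith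
      omega
    · push Not at h
      rw [PySem.Int.le_floordiv_iff_mul_le hx]
      nlinarith [sq_nonneg (s - x)]
  omega

-- correctness of the Newton loop: from any state (x, (x + n//x)//2) with s ≤ x it
-- returns s, the integer square root of n
theorem isqrtAux_eq (n s : Int) (hs : 1 ≤ s)
    (hsn : s * s ≤ n) (hns : n < (s + 1) * (s + 1)) :
    ∀ (N : Nat) (x y : Int) (hk : y < x → 1 ≤ y ∧ 1 ≤ n),
      s ≤ x → y = PySem.Int.floordiv (x + PySem.Int.floordiv n x) 2 →
      x.toNat = N →
      isqrtAux n x y hk = s := by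
  intro N
  induction N using Nat.strong_induction_on with
  | _ N ih =>
    intro x y hk hx hyf hN
    subst hyf
    rw [isqrtAux]
    by_cases h : PySem.Int.floordiv (x + PySem.Int.floordiv n x) 2 < x
    · rw [dif_pos h]
      obtain ⟨hy1, -⟩ := hk h
      have hsy : s ≤ PySem.Int.floordiv (x + PySem.Int.floordiv n x) 2 :=
        newton_lower n x s (by omega) hsn
      exact ih _ (by omega) _ _ _ hsy rfl rfl
    · rw [dif_neg h]
      -- exit: (x + n//x)//2 ≥ x forces x*x ≤ n, and with s ≤ x and n < (s+1)², x = s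
      have hx1 : 1 ≤ x := by omega
      push Not at h
      rw [PySem.Int.le_floordiv_iff_mul_le (by norm_num)] at h
      have hdx : x ≤ PySem.Int.floordiv n x := by omega
      rw [PySem.Int.le_floordiv_iff_mul_le hx1] at hdx
      nlinarith

-- A's loop, from the state after m iterations (last = 2m, total = m(m+1),
-- result = [2,…,2m]), lands at the exit state determined by k
theorem loopA_run (S k : Int) (hk1 : 1 ≤ k) (hkS : k * (k + 1) ≤ S)
    (hS : S < (k + 1) * (k + 2)) :
    ∀ (N : Nat) (m last total : Int) (hl : 0 ≤ last),
      (k - m).toNat = N → 1 ≤ m → m ≤ k → last = 2 * m → total = m * (m + 1) →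
      loopA S last total (evens m) hl =
        if k * (k + 1) = S then (evens k, k * (k + 1))
        else (evens (k + 1), (k + 1) * (k + 2)) := by
  intro N
  induction N using Nat.strong_induction_on with
  | _ N ih =>
    intro m last total hl hN hm1 hmk hlast htot
    subst hlast htot
    by_cases hmlt : m < k
    · -- m(m+1) ≤ (k-1)k < k(k+1) ≤ S: the loop steps
      have hlt : m * (m + 1) < S := by nlinarith
      rw [loopA, dif_pos hlt]
      have he : evens m ++ [2 * m + 2] = evens (m + 1) := by
        rw [evens_succ m (by omega)]; ring_nf
      rw [he]
      exact ih (k - (m + 1)).toNat (by omega) (m + 1) (2 * m + 2)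
        (m * (m + 1) + (2 * m + 2)) (by omega) rfl (by omega) (by omega)
        (by ring) (by ring)
    · -- m = k
      have hmk' : m = k := by omega
      subst hmk'
      by_cases heq : m * (m + 1) = S
      · rw [loopA, dif_neg (by rw [heq]; exact lt_irrefl S), if_pos heq]
      · have hlt : m * (m + 1) < S := by
          rcases lt_or_eq_of_le hkS with h | h
          · exact h
          · exact absurd h heq
        rw [loopA, dif_pos hlt]
        have hstop : ¬ (m * (m + 1) + (2 * m + 2) < S) := by push Not; nlinarith
        rw [loopA, dif_neg hstop]
        have he : evens m ++ [2 * m + 2] = evens (m + 1) := by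
          rw [evens_succ m (by omega)]; ring_nf
        rw [he, if_neg heq]
        have ht : m * (m + 1) + (2 * m + 2) = (m + 1) * (m + 2) := by ring
        rw [ht]

-- ===== VERDICT (by name: the statement is the Claim_ definition above) =====
theorem maximumEvenSplit_spec : Claim_equal_maximumEvenSplit := by
  intro S _ hpre
  unfold Spec_maximumEvenSplit maximumEvenSplit maximumEvenSplit_alt
  by_cases hg : PySem.Int.band S 1 ≠ 0 ∨ S = 0
  · rw [if_pos hg, if_pos hg]
  · rw [if_neg hg, if_neg hg]
    simp only []
    push Not at hg
    have heven : S % 2 = 0 := by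
      have hb := PySem.Int.band_one S
      have hm := PySem.Int.mod_eq_emod_of_pos (a := S) (b := 2) (by norm_num)
      have := hg.1
      omega
    have hS2 : 2 ≤ S := by
      rcases hpre with h | h
      · exact absurd heven h
      · have := hg.2; omega
    set n : Int := 4 * S + 1 with hn
    have hn9 : (9 : Int) ≤ n := by omega
    -- the integer square root s of n
    obtain ⟨s, hs1, hsn, hns⟩ : ∃ s : Int, 1 ≤ s ∧ s * s ≤ n ∧ n < (s + 1) * (s + 1) := by
      have hnn : ((n.toNat : Int)) = n := by omega
      have h1 : ((Nat.sqrt n.toNat : Int)) ^ 2 ≤ (n.toNat : Int) := by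
        exact_mod_cast Nat.sqrt_le' n.toNat
      have h2 : (n.toNat : Int) < ((Nat.sqrt n.toNat : Int) + 1) ^ 2 := by
        exact_mod_cast Nat.lt_succ_sqrt' n.toNat
      rw [hnn] at h1 h2
      refine ⟨(Nat.sqrt n.toNat : Int), ?_, by nlinarith, by nlinarith⟩
      · by_contra hc
        push Not at hc
        have h0 : (0 : Int) ≤ (Nat.sqrt n.toNat : Int) := by positivity
        nlinarith
    -- the Newton loop computes s
    have hiso : isqrtB n = s := by
      unfold isqrtB
      refine isqrtAux_eq n s hs1 hsn hns n.toNat n _ _ (by nlinarith) ?_ rfl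
      have hdnn : PySem.Int.floordiv n n = 1 := by
        rw [PySem.Int.floordiv_eq_iff_of_pos (by omega)]
        constructor <;> nlinarith
      rw [hdnn]
    -- k = (s - 1) // 2 and its bracket k(k+1) ≤ S < (k+1)(k+2)
    set k : Int := PySem.Int.floordiv (isqrtB n - 1) 2 with hkdef
    have hkb : k * 2 ≤ s - 1 ∧ s - 1 < (k + 1) * 2 := by
      rw [hkdef, hiso]
      constructor
      · rw [← PySem.Int.le_floordiv_iff_mul_le (by norm_num)]
      · rw [← PySem.Int.floordiv_lt_iff_lt_mul (by norm_num)]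
        omega
    have hk1 : 1 ≤ k := by
      by_contra hc
      push Not at hc
      have hsle : s ≤ 2 := by omega
      nlinarith
    have hkS : k * (k + 1) ≤ S := by
      have h1 : 2 * k + 1 ≤ s := by omega
      nlinarith
    have hSk : S < (k + 1) * (k + 2) := by
      have h2 : s + 1 ≤ 2 * k + 3 := by omega
      nlinarith
    -- run A's loop
    have hrun := loopA_run S k hk1 hkS hSk (k - 1).toNat 1 2 2 (by norm_num)
      rfl le_rfl hk1 (by norm_num) (by norm_num)
    have hev1 : evens 1 = [2] := by decide
    rw [hev1] at hrun
    rw [hrun]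
    have hmap : (PySem.List.pyRange 1 k 1).map (fun j => 2 * j) = evens (k - 1) := by
      unfold evens
      rw [show k - 1 + 1 = k from by ring]
    rw [hmap]
    have hevk : evens k = evens (k - 1) ++ [2 * k] := by
      have h := evens_succ (k - 1) (by omega)
      rw [show k - 1 + 1 = k from by ring] at h
      rw [h]
    by_cases hceq : k * (k + 1) = S
    · rw [if_pos hceq]
      unfold finishA
      rw [if_neg (by rw [← hceq]; omega)]
      rw [hevk, show (2 : Int) * k = S - k * (k - 1) from by rw [← hceq]; ring]
    · rw [if_neg hceq]
      unfold finishA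
      rw [if_pos (by omega)]
      have hevk1 : evens (k + 1) = (evens (k - 1) ++ [2 * k]) ++ [2 * (k + 1)] := by
        rw [evens_succ k (by omega), hevk]
      rw [hevk1, getLast!_app, List.dropLast_concat, getLast!_app, List.dropLast_concat]
      rw [show S - ((k + 1) * (k + 2) - 2 * (k + 1) - 2 * k) = S - k * (k - 1) from by ring]
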